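-- pv_equiv track=rewrite | github.com/saha18uiuc/sailor | sailor/Planner/baselines/FlashFlex/src/cost_modeling.py | gen_layer_dp_rank_group
-- ===== SOURCE A (Python) =====
-- def gen_layer_dp_rank_group(layer_related_tp_groups):
--     tp_sizes = [len(tp_group) for tp_group in layer_related_tp_groups]
--     max_tp_size = max(tp_sizes)
--
--     padded_tp_groups = []
--     for i in range(len(layer_related_tp_groups)):
--         group = layer_related_tp_groups[i]
--         max_replicate = max_tp_size // tp_sizes[i]
--         padded_tp_group = []
--         for r in group:
--             for _ in range(max_replicate):
--                 padded_tp_group.append(r)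
--         padded_tp_groups.append(padded_tp_group)
--
--     related_dp_rank_groups = []
--     for i in range(max_tp_size):
--         related_dp_rank_group = []
--         for group in padded_tp_groups:
--             related_dp_rank_group.append(group[i])
--         related_dp_rank_groups.append(related_dp_rank_group)
--
--     return related_dp_rank_groups
-- ===== SOURCE B (Python) =====
-- def gen_layer_dp_rank_group(layer_related_tp_groups):
--     max_tp_size = max(len(g) for g in layer_related_tp_groups)
--     return [[g[i // (max_tp_size // len(g))] for g in layer_related_tp_groups]
--             for i in range(max_tp_size)]
-- ===== Notes on version B (the rewrite author's own statement) =====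
-- stated objective: simpler
-- what changed: B drops the intermediate padded_tp_groups entirely: it computes max_tp_size once and builds each rank group directly as a nested comprehension, indexing the original group with i // (max_tp_size // len(g)).
import Mathlib
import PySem

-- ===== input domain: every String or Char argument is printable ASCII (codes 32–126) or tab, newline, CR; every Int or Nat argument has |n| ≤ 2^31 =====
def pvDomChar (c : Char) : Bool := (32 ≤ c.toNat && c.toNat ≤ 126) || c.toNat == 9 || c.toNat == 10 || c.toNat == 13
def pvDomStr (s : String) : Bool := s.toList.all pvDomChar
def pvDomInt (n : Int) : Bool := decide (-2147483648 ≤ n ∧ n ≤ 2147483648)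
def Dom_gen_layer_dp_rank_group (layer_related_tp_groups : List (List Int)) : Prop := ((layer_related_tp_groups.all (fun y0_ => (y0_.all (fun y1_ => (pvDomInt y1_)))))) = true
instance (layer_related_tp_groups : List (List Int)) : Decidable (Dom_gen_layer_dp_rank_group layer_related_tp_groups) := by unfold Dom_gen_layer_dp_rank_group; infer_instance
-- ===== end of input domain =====

-- B removes the padded_tp_groups intermediate and builds each rank group directly by
-- integer-division indexing into the original groups (objective: simpler).


-- ===== PORT A =====
def gen_layer_dp_rank_group (layer_related_tp_groups : List (List Int)) : List (List Int) :=
  let tp_sizes : List Int := layer_related_tp_groups.map (fun g => (g.length : Int))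
  let max_tp_size : Int := (PySem.List.max? tp_sizes (fun x => x)).getD 0
  let padded_tp_groups : List (List Int) :=
    (PySem.List.pyRange 0 (layer_related_tp_groups.length : Int) 1).foldl (fun acc i =>
      let group : List Int := PySem.List.pyGetD layer_related_tp_groups i []
      let max_replicate : Int := PySem.Int.floordiv max_tp_size (PySem.List.pyGetD tp_sizes i 0)
      let padded_tp_group : List Int :=
        group.foldl (fun p r =>
          (PySem.List.pyRange 0 max_replicate 1).foldl (fun p2 _ => p2 ++ [r]) p) []
      acc ++ [padded_tp_group]) []
  (PySem.List.pyRange 0 max_tp_size 1).foldl (fun acc i =>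
    acc ++ [padded_tp_groups.foldl (fun rg group => rg ++ [PySem.List.pyGetD group i 0]) []]) []

-- ===== PORT B =====
def gen_layer_dp_rank_group_alt (layer_related_tp_groups : List (List Int)) : List (List Int) :=
  let max_tp_size : Int :=
    (PySem.List.max? (layer_related_tp_groups.map (fun g => (g.length : Int))) (fun x => x)).getD 0
  (PySem.List.pyRange 0 max_tp_size 1).map (fun i =>
    layer_related_tp_groups.map (fun g =>
      PySem.List.pyGetD g (PySem.Int.floordiv i (PySem.Int.floordiv max_tp_size (g.length : Int))) 0))

-- ===== PRECONDITION & SPEC =====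
-- maximum of the group lengths (0 for the empty list); used by Pre_ below
def pvMaxLen (layer_related_tp_groups : List (List Int)) : Nat :=
  layer_related_tp_groups.foldl (fun acc g => max acc g.length) 0

-- Pre_ excludes exactly the inputs where Python A raises: the empty list (ValueError in max),
-- a group of length 0 (ZeroDivisionError), and a group whose length does not divide the
-- maximal length (IndexError on the padded group).
def Pre_gen_layer_dp_rank_group (layer_related_tp_groups : List (List Int)) : Prop :=
  layer_related_tp_groups ≠ [] ∧
  ∀ g ∈ layer_related_tp_groups, g ≠ [] ∧ g.length ∣ pvMaxLen layer_related_tp_groups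
instance (layer_related_tp_groups : List (List Int)) : Decidable (Pre_gen_layer_dp_rank_group layer_related_tp_groups) := by unfold Pre_gen_layer_dp_rank_group; infer_instance

def pvWitness_gen_layer_dp_rank_group : List (List Int) := [[1, 2], [3, 4, 5, 6], [7]]

def Spec_gen_layer_dp_rank_group (layer_related_tp_groups : List (List Int)) (out : List (List Int)) : Prop := out = gen_layer_dp_rank_group_alt layer_related_tp_groups
instance (layer_related_tp_groups : List (List Int)) (out : List (List Int)) : Decidable (Spec_gen_layer_dp_rank_group layer_related_tp_groups out) := by unfold Spec_gen_layer_dp_rank_group; infer_instance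

-- ===== CLAIM (what is proved, stated in full; the proofs are below) =====
def Claim_equal_gen_layer_dp_rank_group : Prop := ∀ (layer_related_tp_groups : List (List Int)), Dom_gen_layer_dp_rank_group layer_related_tp_groups → Pre_gen_layer_dp_rank_group layer_related_tp_groups → Spec_gen_layer_dp_rank_group layer_related_tp_groups (gen_layer_dp_rank_group layer_related_tp_groups)
-- ===== LEMMAS AND PROOFS =====

lemma cast_foldl_max (t : List (List Int)) (a : Nat) :
    List.foldl max (a : Int) (t.map (fun g => (g.length : Int)))
      = ((t.foldl (fun acc g => max acc g.length) a : Nat) : Int) := by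
  induction t generalizing a with
  | nil => simp
  | cons x t ih =>
    rw [List.map_cons, List.foldl_cons, List.foldl_cons, ← Nat.cast_max, ih]

lemma flatMap_replicate_getD (m : Nat) (hm : 0 < m) :
    ∀ (g : List Int) (k : Nat), k < g.length * m →
    (g.flatMap (fun r => List.replicate m r)).getD k 0 = g.getD (k / m) 0 := by
  intro g
  induction g with
  | nil => intro k hk; simp at hk
  | cons a g ih =>
    intro k hk
    rw [List.flatMap_cons]
    by_cases hkm : k < m
    · rw [List.getD_append _ _ _ _ (by simpa using hkm), Nat.div_eq_of_lt hkm]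
      simp [hkm]
    · rw [Nat.not_lt] at hkm
      rw [List.getD_append_right _ _ _ _ (by simpa using hkm)]
      simp only [List.length_replicate]
      have hlt : k - m < g.length * m := by
        rw [List.length_cons, Nat.succ_mul] at hk; omega
      rw [ih (k - m) hlt]
      have : k / m = (k - m) / m + 1 := by
        conv_lhs => rw [← Nat.sub_add_cancel hkm]
        rw [Nat.add_div_right _ hm]
      rw [this, List.getD_cons_succ]

lemma maxsize_eq (ls : List (List Int)) (h : ls ≠ []) :
    (PySem.List.max? (ls.map (fun g => (g.length : Int))) (fun x => x)).getD 0
      = (pvMaxLen ls : Int) := by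
  obtain ⟨a, t, rfl⟩ := List.exists_cons_of_ne_nil h
  rw [List.map_cons, PySem.List.max?_id_cons, Option.getD_some, pvMaxLen,
    List.foldl_cons, Nat.zero_max]
  exact cast_foldl_max t a.length

lemma len_le_maxLen (ls : List (List Int)) : ∀ g ∈ ls, g.length ≤ pvMaxLen ls :=
  (PySem.List.le_foldl_max_nat ls List.length 0).2

lemma padded_list_eq (ls : List (List Int)) :
    ((PySem.List.pyRange 0 (ls.length : Int) 1).map (fun j =>
       (PySem.List.pyGetD ls j []).flatMap (fun r =>
         (PySem.List.pyRange 0 (PySem.Int.floordiv ((pvMaxLen ls : Nat) : Int)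
             (PySem.List.pyGetD (ls.map (fun g => (g.length : Int))) j 0)) 1).map (fun _ => r))))
      = ls.map (fun g => g.flatMap (fun r => List.replicate (pvMaxLen ls / g.length) r)) := by
  rw [PySem.List.pyRange_zero_natCast, List.map_map]
  apply List.ext_getElem
  · simp
  · intro j h1 h2
    simp only [List.getElem_map, List.getElem_range, Function.comp_apply,
      PySem.List.pyGetD_natCast]
    rw [List.length_map, List.length_range] at h1
    rw [List.getD_eq_getElem ls [] h1,
      List.getD_eq_getElem (ls.map (fun g => (g.length : Int))) 0 (by simpa using h1),
      List.getElem_map, PySem.Int.floordiv_natCast, PySem.List.pyRange_zero_natCast]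
    simp [Function.comp_def, List.map_const']

theorem main_eq (ls : List (List Int)) (hne : ls ≠ [])
    (hgr : ∀ g ∈ ls, g ≠ [] ∧ g.length ∣ pvMaxLen ls) :
    gen_layer_dp_rank_group ls = gen_layer_dp_rank_group_alt ls := by
  have hM := maxsize_eq ls hne
  simp only [gen_layer_dp_rank_group, gen_layer_dp_rank_group_alt, hM,
    PySem.List.foldl_append_singleton_eq_map, PySem.List.foldl_append_eq_flatMap,
    List.nil_append]
  rw [padded_list_eq ls]
  apply List.map_congr_left
  intro i hi
  rw [PySem.List.mem_pyRange_one] at hi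
  obtain ⟨k, rfl⟩ : ∃ k : Nat, i = (k : Int) := ⟨i.toNat, (Int.toNat_of_nonneg hi.1).symm⟩
  have hkM : k < pvMaxLen ls := by exact_mod_cast hi.2
  rw [List.map_map]
  apply List.map_congr_left
  intro g hg
  obtain ⟨hgne, hdvd⟩ := hgr g hg
  have hlen : 0 < g.length := List.length_pos_of_ne_nil hgne
  have hle : g.length ≤ pvMaxLen ls := len_le_maxLen ls g hg
  have hm : 0 < pvMaxLen ls / g.length := Nat.div_pos hle hlen
  have hMm : g.length * (pvMaxLen ls / g.length) = pvMaxLen ls := Nat.mul_div_cancel' hdvd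
  simp only [Function.comp_apply, PySem.List.pyGetD_natCast, PySem.Int.floordiv_natCast]
  exact flatMap_replicate_getD _ hm g k (by rw [hMm]; exact hkM)


-- ===== VERDICT (by name: the statement is the Claim_ definition above) =====
theorem gen_layer_dp_rank_group_spec : Claim_equal_gen_layer_dp_rank_group := by
  intro ls _ hpre
  unfold Spec_gen_layer_dp_rank_group
  exact main_eq ls hpre.1 hpre.2
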